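-- pv_equiv track=rewrite | github.com/NarendraKondaveeti/PythonRepo | Find the Maximum Occurring Character in a String.py | max_occuring_char
-- ===== SOURCE A (Python) =====
-- def max_occuring_char(s):
--     max_count = 0
--     max_char = ''
--
--     # Loop through each character in the string
--     for char in s:
--         count = 0
--         # Count occurrences of the character
--         for ch in s:
--             if ch == char:
--                 count += 1
--         # If the current character count is greater than the previous maximum
--         if count > max_count:
--             max_count = count
--             max_char = char
--
--     return max_char
-- ===== SOURCE B (Python) =====
-- def max_occuring_char(s):
--     counts = {}
--     for ch in s:
--         counts[ch] = counts.get(ch, 0) + 1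
--     max_count = 0
--     max_char = ''
--     for char, count in counts.items():
--         if count > max_count:
--             max_count = count
--             max_char = char
--     return max_char
-- ===== Notes on version B (the rewrite author's own statement) =====
-- stated objective: faster
-- what changed: Replaces the quadratic rescan of the whole string for every character by a single-pass frequency dictionary followed by one scan over its distinct entries (insertion order + strict > preserves A's first-appearing tie-break).
import Mathlib
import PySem

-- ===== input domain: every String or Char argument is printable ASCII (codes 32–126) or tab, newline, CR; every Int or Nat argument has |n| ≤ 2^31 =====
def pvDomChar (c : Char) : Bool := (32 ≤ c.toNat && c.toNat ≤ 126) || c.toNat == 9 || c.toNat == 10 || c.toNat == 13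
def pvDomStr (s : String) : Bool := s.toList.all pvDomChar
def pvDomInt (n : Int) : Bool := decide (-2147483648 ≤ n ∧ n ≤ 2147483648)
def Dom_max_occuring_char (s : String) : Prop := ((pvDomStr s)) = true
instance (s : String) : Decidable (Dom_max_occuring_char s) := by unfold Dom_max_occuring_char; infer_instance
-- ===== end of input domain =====

-- B replaces A's quadratic per-character rescan of the string by a one-pass frequency
-- dictionary followed by a single scan over its distinct entries (faster).


-- ===== PORT A =====
def max_occuring_char (s : String) : String :=
  (s.toList.foldl (fun (st : Int × String) char =>
      let count := s.toList.foldl (fun c ch => if ch == char then c + 1 else c) (0 : Int)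
      if count > st.1 then (count, String.ofList [char]) else st)
    ((0 : Int), "")).2

-- ===== PORT B =====
def max_occuring_char_alt (s : String) : String :=
  let counts : PySem.Dict Char Int :=
    s.toList.foldl (fun d ch => d.insert ch (d.getD ch 0 + 1)) PySem.Dict.empty
  (counts.items.foldl (fun (st : Int × String) kv =>
      if kv.2 > st.1 then (kv.2, String.ofList [kv.1]) else st)
    ((0 : Int), "")).2

-- ===== PRECONDITION & SPEC =====
def Spec_max_occuring_char (s : String) (out : String) : Prop := out = max_occuring_char_alt s
instance (s : String) (out : String) : Decidable (Spec_max_occuring_char s out) := by unfold Spec_max_occuring_char; infer_instance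

-- ===== CLAIM (what is proved, stated in full; the proofs are below) =====
def Claim_equal_max_occuring_char : Prop := ∀ (s : String), Dom_max_occuring_char s → Spec_max_occuring_char s (max_occuring_char s)

-- ===== LEMMAS AND PROOFS =====

-- the common "keep the strict maximum" step, with the count of each char given by w
def pvStep (w : Char → Int) (st : Int × String) (c : Char) : Int × String :=
  if w c > st.1 then (w c, String.ofList [c]) else st

-- the distinct new elements of l (not in seen), in first-occurrence order
def pvNew (seen : List Char) : List Char → List Char
  | [] => []
  | c :: t => if seen.contains c then pvNew seen t else c :: pvNew (seen ++ [c]) t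

theorem pvFoldl_add_eq (l : List Char) (seen : List Char) :
    l.foldl PySem.Set.add seen = seen ++ pvNew seen l := by
  induction l generalizing seen with
  | nil => simp [pvNew]
  | cons c t ih =>
    simp only [List.foldl_cons, pvNew, PySem.Set.add, PySem.Set.contains]
    split_ifs with h
    · exact ih seen
    · rw [ih (seen ++ [c])]
      simp

theorem pvStep_fst_mono (w : Char → Int) (st : Int × String) (c : Char) :
    st.1 ≤ (pvStep w st c).1 := by
  unfold pvStep
  split_ifs with h
  · simp; omega
  · exact le_refl _

theorem pvStep_fst_ge (w : Char → Int) (st : Int × String) (c : Char) :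
    w c ≤ (pvStep w st c).1 := by
  unfold pvStep
  split_ifs with h
  · simp
  · omega

theorem pvFoldl_dedup (w : Char → Int) (l : List Char) (seen : List Char)
    (st : Int × String) (hseen : ∀ c ∈ seen, w c ≤ st.1) :
    l.foldl (pvStep w) st = (pvNew seen l).foldl (pvStep w) st := by
  induction l generalizing seen st with
  | nil => simp [pvNew]
  | cons c t ih =>
    simp only [List.foldl_cons, pvNew]
    split_ifs with h
    · have hmem : c ∈ seen := by simpa using h
      have hstep : pvStep w st c = st := by
        unfold pvStep
        have := hseen c hmem
        split_ifs with h' <;> [omega; rfl]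
      rw [hstep]
      exact ih seen st hseen
    · simp only [List.foldl_cons]
      apply ih (seen ++ [c])
      intro c' hc'
      rcases List.mem_append.mp hc' with h1 | h2
      · exact le_trans (hseen c' h1) (pvStep_fst_mono w st c)
      · have hc : c' = c := by simpa using h2
        rw [hc]
        exact pvStep_fst_ge w st c

-- ===== VERDICT (by name: the statement is the Claim_ definition above) =====
theorem max_occuring_char_spec : Claim_equal_max_occuring_char := by
  intro s _
  unfold Spec_max_occuring_char max_occuring_char max_occuring_char_alt
  simp only [PySem.Dict.foldl_insert_getD_add_one_eq_counter, PySem.Dict.items_counter,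
    List.foldl_map, PySem.List.foldl_beq_add_one, zero_add]
  show (List.foldl (pvStep (fun char => (s.toList.count char : Int))) ((0 : Int), "")
          s.toList).2
     = (List.foldl (pvStep (fun char => (s.toList.count char : Int))) ((0 : Int), "")
          (PySem.Set.ofList s.toList)).2
  rw [PySem.Set.ofList_eq_foldl, pvFoldl_add_eq, List.nil_append,
    pvFoldl_dedup (fun char => (s.toList.count char : Int)) s.toList [] _ (by simp)]
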